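-- pv_equiv track=rewrite | github.com/cmisst/road-feature-detection | yolo_output.py | analyze_yolo
-- ===== SOURCE A (Python) =====
-- def analyze_yolo(lines):
--     assert(len(lines)>=2)
--     assert(lines.pop(-1)=='Enter Image Path: ')
--     lines.pop(0)
--     for i in range(len(lines)):
--         lines[i] = lines[i].split(sep=':', maxsplit=1)[0]
--     d = dict.fromkeys(lines)
--     if 'traffic light' in d:
--         return 1
--     elif 'stop sign' in d:
--         return 2
--     else:
--         return 0
-- ===== SOURCE B (Python) =====
-- def analyze_yolo(lines):
--     assert(len(lines)>=2)
--     assert(lines.pop(-1)=='Enter Image Path: ')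
--     lines.pop(0)
--     lines[:] = [l.split(sep=':', maxsplit=1)[0] for l in lines]
--     RANK = {'traffic light': 1, 'stop sign': 2}
--     m = min((RANK.get(l, 3) for l in lines), default=3)
--     return 0 if m == 3 else m
-- ===== Notes on version B (the rewrite author's own statement) =====
-- stated objective: alternative
-- what changed: B replaces A's build-a-dict-then-two-membership-tests logic by a numeric min-reduction: each label is mapped to a priority rank (traffic light=1, stop sign=2, other=3) and the answer is the minimum rank over the list (3 mapped back to 0), so the priority between the two targets is arithmetic rather than a branch over membership tests.
import Mathlib
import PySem

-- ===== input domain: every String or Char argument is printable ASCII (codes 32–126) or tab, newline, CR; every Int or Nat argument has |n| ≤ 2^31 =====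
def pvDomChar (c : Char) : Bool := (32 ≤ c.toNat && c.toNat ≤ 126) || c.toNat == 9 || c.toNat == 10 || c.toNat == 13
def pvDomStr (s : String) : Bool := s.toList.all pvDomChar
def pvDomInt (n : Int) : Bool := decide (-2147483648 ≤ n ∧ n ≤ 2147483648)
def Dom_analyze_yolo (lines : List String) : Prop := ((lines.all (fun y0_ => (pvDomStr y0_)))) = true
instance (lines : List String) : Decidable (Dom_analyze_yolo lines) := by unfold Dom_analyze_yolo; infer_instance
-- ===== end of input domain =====

-- B replaces the dict + membership tests by a min-reduction over priority ranks
-- (traffic light=1, stop sign=2, other=3; 3 maps back to 0).  Equivalence is about the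
-- RETURN value; both Pythons mutate `lines` in place identically.

-- lines[i].split(sep=':', maxsplit=1)[0]  (sep ≠ "", so splitMax? is some and nonempty)
def pySplitHead (s : String) : String :=
  (((PySem.Str.splitMax? s ":" 1).getD []).headD "")

-- ===== PORT A =====
def analyze_yolo (lines : List String) : Int :=
  -- the two asserts: len(lines)>=2 and lines.pop(-1)=='Enter Image Path: '; outside Pre_ A raises
  if 2 ≤ lines.length ∧ lines.getLast? = some "Enter Image Path: " then
    -- after pop(-1) and pop(0) the list is lines.dropLast.drop 1; the loop rewrites each element
    let mapped := ((lines.dropLast).drop 1).map pySplitHead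
    -- d = dict.fromkeys(mapped)  (values None)
    let d : PySem.Dict String (Option Int) :=
      mapped.foldl (fun d k => d.insert k none) PySem.Dict.empty
    if d.contains "traffic light" then 1
    else if d.contains "stop sign" then 2
    else 0
  else 0

-- ===== PORT B =====
-- RANK.get(l, 3)
def rankOf (s : String) : Int :=
  if s == "traffic light" then 1 else if s == "stop sign" then 2 else 3

def analyze_yolo_alt (lines : List String) : Int :=
  if 2 ≤ lines.length ∧ lines.getLast? = some "Enter Image Path: " then
    let labels := ((lines.dropLast).drop 1).map pySplitHead
    -- min(…, default=3): fold of `min` with initial value 3 (all ranks ≤ 3)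
    let m := labels.foldl (fun a s => min a (rankOf s)) 3
    if m == 3 then 0 else m
  else 0

-- ===== PRECONDITION & SPEC =====
-- exactly the inputs on which A's two asserts pass (otherwise A raises AssertionError)
def Pre_analyze_yolo (lines : List String) : Prop :=
  2 ≤ lines.length ∧ lines.getLast? = some "Enter Image Path: "
instance (lines : List String) : Decidable (Pre_analyze_yolo lines) := by
  unfold Pre_analyze_yolo; infer_instance
def pvWitness_analyze_yolo : List String :=
  ["header", "traffic light: 90%", "Enter Image Path: "]
def Spec_analyze_yolo (lines : List String) (out : Int) : Prop := out = analyze_yolo_alt lines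
instance (lines : List String) (out : Int) : Decidable (Spec_analyze_yolo lines out) := by
  unfold Spec_analyze_yolo; infer_instance

-- ===== CLAIM (what is proved, stated in full; the proofs are below) =====
def Claim_equal_analyze_yolo : Prop := ∀ (lines : List String), Dom_analyze_yolo lines → Pre_analyze_yolo lines → Spec_analyze_yolo lines (analyze_yolo lines)

-- ===== LEMMAS AND PROOFS =====

-- membership in dict.fromkeys(l) is membership in l
theorem contains_fromkeys (l : List String) (d : PySem.Dict String (Option Int)) (x : String) :
    (l.foldl (fun d k => d.insert k none) d).contains x = (d.contains x || l.any (fun k => k == x)) := by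
  induction l generalizing d with
  | nil => simp
  | cons h t ih =>
    simp only [List.foldl_cons, List.any_cons, ih, PySem.Dict.contains_insert]
    cases hx : (x == h) <;> cases hh : (h == x) <;>
      simp_all [beq_iff_eq, Bool.or_comm]

-- the min-of-ranks fold computes the priority chain
theorem foldl_min_rank (l : List String) (a : Int) (ha : a ≤ 3) :
    l.foldl (fun a s => min a (rankOf s)) a
      = min a (if l.any (fun s => s == "traffic light") then 1
               else if l.any (fun s => s == "stop sign") then 2 else 3) := by
  induction l generalizing a with
  | nil => simp [min_eq_left ha]
  | cons h t ih =>
    have hr : min a (rankOf h) ≤ 3 := le_trans (min_le_left _ _) ha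
    simp only [List.foldl_cons, List.any_cons, ih _ hr]
    unfold rankOf
    by_cases h1 : h = "traffic light" <;> by_cases h2 : h = "stop sign" <;>
      simp [h1, h2] <;> split_ifs <;> omega

-- ===== VERDICT (by name: the statement is the Claim_ definition above) =====
theorem analyze_yolo_spec : Claim_equal_analyze_yolo := by
  intro lines _ hpre
  unfold Spec_analyze_yolo analyze_yolo analyze_yolo_alt
  unfold Pre_analyze_yolo at hpre
  rw [if_pos hpre, if_pos hpre]
  simp only [contains_fromkeys, PySem.Dict.contains_empty, Bool.false_or,
    foldl_min_rank _ 3 le_rfl]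
  split_ifs <;> simp_all
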